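-- pv_equiv track=rewrite | github.com/daniel-reich/turbo-robot | fsNMnyjMkErQtvpMW_16.py | holey_sort
-- ===== SOURCE A (Python) =====
-- def holey_sort(lst):
--     t_v = []
--     d = {'4':1,'6':1,'8':2,'0':1,'9':1}
--     lst = lst = [str(a) for a in lst]
--     for a in lst:
--         ls = 0
--         for b in a:
--             if b in d:
--                 ls+=d[b]
--             else:
--                 ls+=0
--         t_v.append((a,ls))
--     a = lambda x:x[1]
--     return [int(a[0]) for a in sorted(t_v,key=a,reverse = False)]
-- ===== SOURCE B (Python) =====
-- def holey_sort(lst):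
--     d = {'4': 1, '6': 1, '8': 2, '0': 1, '9': 1}
--     buckets = {}
--     for n in lst:
--         s = str(n)
--         k = sum(d.get(c, 0) for c in s)
--         buckets.setdefault(k, []).append(s)
--     out = []
--     for k in sorted(buckets):
--         out.extend(int(s) for s in buckets[k])
--     return out
-- ===== Notes on version B (the rewrite author's own statement) =====
-- stated objective: alternative
-- what changed: Replaces building a (string, holes) pair list and calling a comparison sort on it by a single pass that buckets the string forms in a dict keyed by hole count, then concatenates the buckets in ascending key order (stable by construction).
import Mathlib
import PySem

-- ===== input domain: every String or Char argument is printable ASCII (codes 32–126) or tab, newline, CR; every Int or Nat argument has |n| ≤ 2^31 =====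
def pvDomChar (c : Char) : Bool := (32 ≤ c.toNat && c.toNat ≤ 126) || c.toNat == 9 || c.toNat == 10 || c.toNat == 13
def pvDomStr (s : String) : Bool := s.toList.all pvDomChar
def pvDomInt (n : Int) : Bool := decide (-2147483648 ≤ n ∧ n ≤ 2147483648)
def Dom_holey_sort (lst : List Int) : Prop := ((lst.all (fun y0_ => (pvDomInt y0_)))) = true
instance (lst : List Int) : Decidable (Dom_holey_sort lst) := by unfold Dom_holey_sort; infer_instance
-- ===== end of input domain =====

-- B replaces the sort-by-key of (string, holes) pairs by a single-pass bucketing dict keyed by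
-- hole count, concatenating buckets in ascending key order (alternative decomposition, same result).

-- ===== PORT A =====
-- the dict d = {'4':1,'6':1,'8':2,'0':1,'9':1} (Source B uses the same literal table)
def pvHoles : PySem.Dict Char Int :=
  PySem.Dict.ofList [('4', 1), ('6', 1), ('8', 2), ('0', 1), ('9', 1)]

def holey_sort (lst : List Int) : List Int :=
  -- lst = [str(a) for a in lst]
  let lst' : List String := lst.map (fun a => PySem.Int.toStr a)
  -- the t_v-building loop: for a in lst: ls = 0; for b in a: …; t_v.append((a, ls))
  let t_v : List (String × Int) := lst'.foldl (fun t_v a =>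
    let ls : Int := a.toList.foldl (fun ls b =>
      if (pvHoles.get? b).isSome then ls + pvHoles.getD b 0 else ls + 0) 0
    t_v ++ [(a, ls)]) []
  -- [int(a[0]) for a in sorted(t_v, key=lambda x: x[1], reverse=False)]
  -- int(a[0]) never raises here: a[0] is str(n) for an Int n, so ofStr? is always some
  (PySem.List.sorted t_v (fun x => x.2) false).map (fun a => (PySem.Int.ofStr? a.1).getD 0)

-- ===== PORT B =====

def holey_sort_alt (lst : List Int) : List Int :=
  -- buckets.setdefault(k, []).append(s) loop
  let buckets : PySem.Dict Int (List String) := lst.foldl (fun d n =>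
    let s := PySem.Int.toStr n
    let k : Int := (s.toList.map (fun c => pvHoles.getD c 0)).sum
    d.modify k [] (fun l => l ++ [s])) PySem.Dict.empty
  -- for k in sorted(buckets): out.extend(int(s) for s in buckets[k])
  (PySem.List.sorted buckets.keys (fun x => x) false).foldl
    (fun out k => out ++ (buckets.getD k []).map (fun s => (PySem.Int.ofStr? s).getD 0)) []

-- ===== PRECONDITION & SPEC =====
def Spec_holey_sort (lst : List Int) (out : List Int) : Prop := out = holey_sort_alt lst
instance (lst : List Int) (out : List Int) : Decidable (Spec_holey_sort lst out) := by unfold Spec_holey_sort; infer_instance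

-- ===== CLAIM (what is proved, stated in full; the proofs are below) =====
def Claim_equal_holey_sort : Prop := ∀ (lst : List Int), Dom_holey_sort lst → Spec_holey_sort lst (holey_sort lst)

-- ===== LEMMAS AND PROOFS =====

-- the shared hole-count key
def pvKey (n : Int) : Int := ((PySem.Int.toStr n).toList.map (fun c => pvHoles.getD c 0)).sum

lemma pvHoles_eq : pvHoles = pvHoles := by decide

-- A's inner per-character loop computes the hole-count sum
lemma innerLoop_eq (cs : List Char) :
    cs.foldl (fun ls b =>
      if (pvHoles.get? b).isSome then ls + pvHoles.getD b 0 else ls) 0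
    = (cs.map (fun c => pvHoles.getD c 0)).sum := by
  have hstep : (fun (ls : Int) (b : Char) =>
      if (pvHoles.get? b).isSome then ls + pvHoles.getD b 0 else ls)
      = (fun ls b => ls + pvHoles.getD b 0) := by
    funext ls b
    rw [pvHoles_eq]
    by_cases h : (pvHoles.get? b).isSome
    · simp [h]
    · have h0 : pvHoles.getD b 0 = 0 := by
        cases hg : pvHoles.get? b with
        | none => simp [PySem.Dict.getD, hg]
        | some v => simp [hg] at h
      simp [h, h0]
  rw [hstep, PySem.List.foldl_add]
  simp

-- insertBy passes over a prefix it is not "before"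
lemma insertBy_pass {α : Type} (bef : α → α → Bool) (x : α) :
    ∀ (l1 l2 : List α), (∀ y ∈ l1, bef x y = false) →
    PySem.List.insertBy bef x (l1 ++ l2) = l1 ++ PySem.List.insertBy bef x l2 := by
  intro l1
  induction l1 with
  | nil => intro l2 _; simp
  | cons y t ih =>
    intro l2 h
    have hy : bef x y = false := h y (by simp)
    cases t ++ l2 with
    | nil =>
      simp only [List.cons_append, PySem.List.insertBy, hy]
      rw [ih l2 (fun z hz => h z (by simp [hz]))]
      simp
    | cons z zs =>
      simp only [List.cons_append, PySem.List.insertBy, hy]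
      rw [← ih l2 (fun z hz => h z (by simp [hz]))]
      simp

-- insertBy goes straight in front of a list it is "before"
lemma insertBy_front {α : Type} (bef : α → α → Bool) (x : α) (l : List α)
    (h : ∀ y ∈ l, bef x y = true) :
    PySem.List.insertBy bef x l = x :: l := by
  cases l with
  | nil => rfl
  | cons y t => simp [PySem.List.insertBy, h y (by simp)]

-- inserting x into a bucket decomposition puts it at the end of its own bucket
lemma insertBy_flatMap (key : Int → Int) (x : Int) :
    ∀ (ks : List Int), ks.Pairwise (· < ·) → key x ∈ ks →
    ∀ (F : Int → List Int), (∀ k ∈ ks, ∀ y ∈ F k, key y = k) →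
    PySem.List.insertBy (fun a b => decide (key a < key b)) x (ks.flatMap F)
      = ks.flatMap (fun k => F k ++ if key x == k then [x] else []) := by
  intro ks
  induction ks with
  | nil => intro _ h; simp at h
  | cons k ks' ih =>
    intro hpw hmem F hF
    have hpw' : ks'.Pairwise (· < ·) := hpw.of_cons
    have hlt : ∀ k' ∈ ks', k < k' := fun k' hk' => (List.pairwise_cons.mp hpw).1 k' hk'
    by_cases hxk : key x = k
    · -- x lands at the end of bucket k
      have h1 : ∀ y ∈ F k, (fun a b => decide (key a < key b)) x y = false := by
        intro y hy
        have := hF k (by simp) y hy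
        simp [this, hxk]
      have h2 : ∀ z ∈ ks'.flatMap F, (fun a b => decide (key a < key b)) x z = true := by
        intro z hz
        obtain ⟨k', hk', hzk'⟩ := List.mem_flatMap.mp hz
        have := hF k' (by simp [hk']) z hzk'
        simp [this, hxk]
        exact hlt k' hk'
      rw [List.flatMap_cons, insertBy_pass _ _ _ _ h1, insertBy_front _ _ _ h2]
      have : ∀ k' ∈ ks', (F k' ++ if key x == k' then [x] else []) = F k' := by
        intro k' hk'
        have : key x ≠ k' := by have := hlt k' hk'; omega
        simp [this]
      rw [List.flatMap_cons, List.flatMap_congr (fun k' hk' => this k' hk')]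
      simp [hxk]
    · -- x passes bucket k and is inserted further right
      have hmem' : key x ∈ ks' := by
        rcases List.mem_cons.mp hmem with h | h
        · exact absurd h hxk
        · exact h
      have hkx : k < key x := hlt _ hmem'
      have h1 : ∀ y ∈ F k, (fun a b => decide (key a < key b)) x y = false := by
        intro y hy
        have := hF k (by simp) y hy
        simp [this]
        omega
      rw [List.flatMap_cons, insertBy_pass _ _ _ _ h1,
        ih hpw' hmem' F (fun k' hk' => hF k' (by simp [hk']))]
      simp [List.flatMap_cons]
      exact hxk

-- a stable sort by key is the ascending concatenation of the key-buckets
lemma sorted_eq_flatMap_filter (key : Int → Int) (ks : List Int)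
    (hpw : ks.Pairwise (· < ·)) :
    ∀ (xs : List Int), (∀ x ∈ xs, key x ∈ ks) →
    PySem.List.sorted xs key false = ks.flatMap (fun k => xs.filter (fun x => key x == k)) := by
  intro xs
  induction xs using List.reverseRecOn with
  | nil =>
    intro _
    have h2 : ks.flatMap (fun _ => ([] : List Int)) = [] := by
      induction ks with
      | nil => simp
      | cons a t iht => simp
    simp only [List.filter_nil, h2]
    rfl
  | append_singleton xs x ih =>
    intro hmem
    have hx : key x ∈ ks := hmem x (by simp)
    have hxs : ∀ y ∈ xs, key y ∈ ks := fun y hy => hmem y (by simp [hy])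
    rw [PySem.List.sorted_eq_foldl_insertBy, List.foldl_append]
    simp only [List.foldl_cons, List.foldl_nil]
    rw [← PySem.List.sorted_eq_foldl_insertBy, ih hxs]
    rw [insertBy_flatMap key x ks hpw hx _
      (fun k hk y hy => by
        have := List.mem_filter.mp hy
        exact by simpa using this.2)]
    apply List.flatMap_congr
    intro k hk
    simp [List.filter_append, List.filter_singleton]

-- insertBy commutes with mapping when the comparison factors through the map
lemma insertBy_map {α β : Type} (g : α → β) (keyA : α → Int) (keyB : β → Int)
    (hkey : ∀ a, keyB (g a) = keyA a) (x : α) :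
    ∀ (l : List α),
    PySem.List.insertBy (fun a b => decide (keyB a < keyB b)) (g x) (l.map g)
      = (PySem.List.insertBy (fun a b => decide (keyA a < keyA b)) x l).map g := by
  intro l
  induction l with
  | nil => rfl
  | cons y t ih =>
    simp only [List.map_cons, PySem.List.insertBy, hkey]
    by_cases h : keyA x < keyA y
    · simp [h]
    · simp [h, ih]

-- sorting the mapped list by a key that factors through the map is mapping the sorted list
lemma sorted_map (g : Int → String × Int) (keyA : Int → Int)
    (hkey : ∀ a, (g a).2 = keyA a) (xs : List Int) :
    PySem.List.sorted (xs.map g) (fun p => p.2) false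
      = (PySem.List.sorted xs keyA false).map g := by
  rw [PySem.List.sorted_eq_foldl_insertBy, PySem.List.sorted_eq_foldl_insertBy]
  induction xs using List.reverseRecOn with
  | nil => rfl
  | append_singleton xs x ih =>
    rw [List.map_append, List.foldl_append, List.foldl_append]
    simp only [List.map_cons, List.map_nil, List.foldl_cons, List.foldl_nil]
    rw [ih, insertBy_map g keyA (fun p => p.2) hkey]

-- ===== VERDICT (by name: the statement is the Claim_ definition above) =====
theorem holey_sort_spec : Claim_equal_holey_sort := by
  intro lst _
  unfold Spec_holey_sort
  simp only [holey_sort, holey_sort_alt]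
  -- normalize A
  rw [PySem.List.foldl_append_singleton_eq_map]
  simp only [List.nil_append, List.map_map]
  have hA :
      (lst.map (fun a =>
        ((PySem.Int.toStr a),
          (PySem.Int.toStr a).toList.foldl (fun ls b =>
            if (pvHoles.get? b).isSome then ls + pvHoles.getD b 0 else ls + 0) 0)))
      = lst.map (fun a => (PySem.Int.toStr a, pvKey a)) := by
    apply List.map_congr_left
    intro a _
    simp [innerLoop_eq, pvKey]
  rw [Function.comp_def, hA,
    sorted_map (fun a => (PySem.Int.toStr a, pvKey a)) pvKey (fun a => rfl), List.map_map]
  -- normalize B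
  have hfold :
      lst.foldl (fun d n =>
        d.modify (((PySem.Int.toStr n).toList.map (fun c => pvHoles.getD c 0)).sum) []
          (fun l => l ++ [PySem.Int.toStr n])) (PySem.Dict.empty)
      = (lst.map (fun n => (pvKey n, PySem.Int.toStr n))).foldl
          (fun d p => d.modify p.1 [] (fun l => l ++ [p.2])) (PySem.Dict.empty) := by
    rw [List.foldl_map]
    simp [pvKey]
  rw [hfold]
  set l' := lst.map (fun n => (pvKey n, PySem.Int.toStr n)) with hl'
  set bk := l'.foldl (fun d p => d.modify p.1 [] (fun l => l ++ [p.2]))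
      (PySem.Dict.empty (κ := Int) (ν := List String)) with hbk
  have hkeys : bk.keys = PySem.Set.ofList (lst.map pvKey) := by
    rw [hbk, hl', List.foldl_map,
      PySem.Dict.keys_foldl_modify_key lst (fun n => pvKey n) [] (fun _ n l => l ++ [PySem.Int.toStr n])]
    rfl
  have hgetD : ∀ k, bk.getD k [] = (l'.filter (fun p => p.1 == k)).map (fun p => p.2) := by
    intro k
    rw [hbk, PySem.Dict.getD_foldl_modify_append, PySem.Dict.getD_empty, List.nil_append]
  rw [PySem.List.foldl_append_eq_flatMap, List.nil_append, hkeys]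
  set ks := PySem.List.sorted (PySem.Set.ofList (lst.map pvKey)) (fun x => x) false with hks
  have hpw : ks.Pairwise (· < ·) := PySem.List.sorted_ofList_pairwise_lt _
  have hcov : ∀ x ∈ lst, pvKey x ∈ ks := by
    intro x hx
    rw [hks, PySem.List.mem_sorted, PySem.Set.mem_ofList]
    exact List.mem_map_of_mem hx
  rw [sorted_eq_flatMap_filter pvKey ks hpw lst hcov, List.map_flatMap]
  apply List.flatMap_congr
  intro k _
  rw [hgetD k, hl', List.filter_map, List.map_map, List.map_map]
  rfl
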